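-- pv_equiv track=rewrite | github.com/syaofox/fastpic | main.py | _compute_folder_counts
-- ===== SOURCE A (Python) =====
-- def _compute_folder_counts(rel_paths: list[str]) -> dict[str, int]:
--     """从 relative_path 列表计算每个文件夹下的图片总数（含子目录）。
--     O(N * D)，N=图片数，D=平均路径深度，无需额外数据库查询。"""
--     counts: dict[str, int] = {"": len(rel_paths)}  # 根目录 = 全部图片
--     for rp in rel_paths:
--         parts = rp.split("/")
--         for i in range(1, len(parts)):  # 不含文件名本身
--             prefix = "/".join(parts[:i])
--             counts[prefix] = counts.get(prefix, 0) + 1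
--     return counts
-- ===== SOURCE B (Python) =====
-- def _compute_folder_counts(rel_paths: list[str]) -> dict[str, int]:
--     """Two staged passes: first FLATTEN every file's folder chain into one
--     stream, building each prefix incrementally (a growing accumulator string,
--     no slice+join per depth), then count the stream in a single pass."""
--     prefixes: list[str] = []
--     for rp in rel_paths:
--         acc = None
--         for part in rp.split("/")[:-1]:
--             acc = part if acc is None else acc + "/" + part
--             prefixes.append(acc)
--     counts: dict[str, int] = {"": len(rel_paths)}
--     for p in prefixes:
--         counts[p] = counts.get(p, 0) + 1
--     return counts
-- ===== Notes on version B (the rewrite author's own statement) =====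
-- stated objective: alternative
-- what changed: B replaces A's nested per-depth slice+join loop by two staged passes: it first flattens every file's folder chain into one stream, building each prefix incrementally from a growing accumulator string, then counts the whole stream in a single dict pass.
import Mathlib
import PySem

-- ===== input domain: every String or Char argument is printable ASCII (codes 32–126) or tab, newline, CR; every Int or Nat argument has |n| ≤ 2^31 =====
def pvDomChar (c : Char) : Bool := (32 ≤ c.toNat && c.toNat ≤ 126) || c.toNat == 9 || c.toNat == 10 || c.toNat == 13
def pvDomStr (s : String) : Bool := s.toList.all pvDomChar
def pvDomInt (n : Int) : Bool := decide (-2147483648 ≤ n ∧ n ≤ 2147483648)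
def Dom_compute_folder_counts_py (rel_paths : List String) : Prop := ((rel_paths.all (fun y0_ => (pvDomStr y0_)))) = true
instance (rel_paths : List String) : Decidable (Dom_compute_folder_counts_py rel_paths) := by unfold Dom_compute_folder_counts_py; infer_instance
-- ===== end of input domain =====

-- B flattens every file's folder chain into one stream (building each prefix incrementally
-- with an accumulator instead of a slice+join per depth) and counts the stream in one pass.

-- ===== PORT A =====
-- rp.split("/") — exact: the separator is non-empty, PySem.Chars.splitOn is that form of str.split
def pvSplitSlash (rp : String) : List String :=
  (PySem.Chars.splitOn rp.toList ['/']).map (fun cs => String.ofList cs)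

def compute_folder_counts_py (rel_paths : List String) : List (String × Int) :=
  (rel_paths.foldl
    (fun counts rp =>
      let parts := pvSplitSlash rp
      (PySem.List.pyRange 1 (parts.length : Int) 1).foldl
        (fun counts i =>
          let pfx := PySem.Str.join "/" (PySem.List.slice parts none (some i))
          counts.insert pfx (counts.getD pfx 0 + 1))
        counts)
    (PySem.Dict.empty.insert "" (rel_paths.length : Int))).items

-- ===== PORT B =====
-- the inner 'for part in parts[:-1]: acc = …; prefixes.append(acc)' loop; acc is kept as
-- List Char ('acc + "/" + part' = a ++ '/' :: part.toList — exact, Python str concat)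
def pvAccumChain : Option (List Char) → List String → List String
  | _, [] => []
  | none, part :: rest => part :: pvAccumChain (some part.toList) rest
  | some acc, part :: rest =>
      String.ofList (acc ++ '/' :: part.toList)
        :: pvAccumChain (some (acc ++ '/' :: part.toList)) rest

def compute_folder_counts_py_alt (rel_paths : List String) : List (String × Int) :=
  let prefixes :=
    rel_paths.foldl
      (fun prefixes rp =>
        prefixes ++ pvAccumChain none (PySem.List.slice (pvSplitSlash rp) none (some (-1))))
      []
  (prefixes.foldl
    (fun counts p => counts.insert p (counts.getD p 0 + 1))
    (PySem.Dict.empty.insert "" (rel_paths.length : Int))).items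

-- ===== PRECONDITION & SPEC =====
def Spec_compute_folder_counts_py (rel_paths : List String) (out : List (String × Int)) : Prop := out = compute_folder_counts_py_alt rel_paths
instance (rel_paths : List String) (out : List (String × Int)) : Decidable (Spec_compute_folder_counts_py rel_paths out) := by unfold Spec_compute_folder_counts_py; infer_instance

-- ===== CLAIM (what is proved, stated in full; the proofs are below) =====
def Claim_equal_compute_folder_counts_py : Prop := ∀ (rel_paths : List String), Dom_compute_folder_counts_py rel_paths → Spec_compute_folder_counts_py rel_paths (compute_folder_counts_py rel_paths)

-- ===== LEMMAS AND PROOFS =====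

-- the canonical prefix chain of a directory list: j-th element joins the first j+1 parts
def pvChainC (D : List String) : List String :=
  (List.range D.length).map
    (fun j => String.ofList (PySem.Chars.join ['/'] ((D.take (j + 1)).map String.toList)))

-- the accumulator loop with a started accumulator prepends 'acc + "/"' to every joined prefix
theorem pvAccumChain_some (r : List String) :
    ∀ (a : List Char),
    pvAccumChain (some a) r
      = (List.range r.length).map
          (fun j => String.ofList (a ++ '/' :: PySem.Chars.join ['/'] ((r.take (j + 1)).map String.toList))) := by
  induction r with
  | nil => intro a; rfl
  | cons q r' ih =>
    intro a
    rw [pvAccumChain, ih, List.length_cons, List.range_succ_eq_map, List.map_cons, List.map_map]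
    congr 1
    · simp [PySem.Chars.join_singleton]
    · refine List.map_congr_left ?_
      intro j hj
      have hj' : j < r'.length := List.mem_range.mp hj
      rcases r' with _ | ⟨q', r''⟩
      · simp at hj'
      · simp only [Function.comp_apply, List.take_succ_cons, List.map_cons,
          PySem.Chars.join_cons_cons]
        congr 1
        simp

-- the accumulator loop from None computes the canonical chain
theorem pvAccumChain_none (D : List String) : pvAccumChain none D = pvChainC D := by
  rcases D with _ | ⟨p, r⟩
  · rfl
  · rw [pvAccumChain, pvAccumChain_some, pvChainC, List.length_cons,
      List.range_succ_eq_map, List.map_cons, List.map_map]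
    congr 1
    · simp [PySem.Chars.join_singleton, String.ofList_toList]
    · refine List.map_congr_left ?_
      intro j hj
      have hj' : j < r.length := List.mem_range.mp hj
      rcases r with _ | ⟨q', r''⟩
      · simp at hj'
      · simp only [Function.comp_apply, List.take_succ_cons, List.map_cons,
          PySem.Chars.join_cons_cons]
        congr 1
        simp

-- A's per-depth slice+join list over parts is the canonical chain of parts[:-1]
theorem pvChain_split (parts : List String) :
    (PySem.List.pyRange 1 (parts.length : Int) 1).map
      (fun i => PySem.Str.join "/" (PySem.List.slice parts none (some i)))
    = pvChainC parts.dropLast := by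
  rcases List.eq_nil_or_concat parts with hnil | ⟨ys, y, rfl⟩
  · subst hnil
    simp [PySem.List.pyRange_one_eq_nil, pvChainC]
  · simp only [List.concat_eq_append, List.dropLast_concat]
    have hlen : ((ys ++ [y]).length : Int) = (ys.length : Int) + 1 := by simp
    rw [hlen, PySem.List.pyRange_one, pvChainC, List.map_map]
    have h1 : ((ys.length : Int) + 1 - 1).toNat = ys.length := by omega
    rw [h1]
    refine List.map_congr_left ?_
    intro k hk
    have hk' : k < ys.length := List.mem_range.mp hk
    simp only [Function.comp_apply]
    have h0 : (0 : Int) ≤ 1 + (k : Int) := by omega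
    rw [PySem.List.slice_to _ h0]
    have h2 : ((1 : Int) + (k : Int)).toNat = k + 1 := by omega
    rw [h2, List.take_append_of_le_length (by omega)]
    have hj : PySem.Str.join "/" (ys.take (k + 1))
        = String.ofList (PySem.Chars.join "/".toList (((ys.take (k + 1)).map String.toList))) := by
      rw [← PySem.Str.toList_join, String.ofList_toList]
    exact hj

-- the whole equivalence
theorem pv_final (rel_paths : List String) :
    compute_folder_counts_py rel_paths = compute_folder_counts_py_alt rel_paths := by
  unfold compute_folder_counts_py compute_folder_counts_py_alt
  rw [PySem.List.foldl_append_eq_flatMap, List.nil_append]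
  simp only [List.foldl_flatMap]
  congr 1
  refine PySem.List.foldl_congr_mem _ _ _ _ ?_
  intro counts rp _
  show (PySem.List.pyRange 1 ((pvSplitSlash rp).length : Int) 1).foldl
        (fun counts i =>
          counts.insert (PySem.Str.join "/" (PySem.List.slice (pvSplitSlash rp) none (some i)))
            (counts.getD (PySem.Str.join "/" (PySem.List.slice (pvSplitSlash rp) none (some i))) 0 + 1))
        counts
      = (pvAccumChain none (PySem.List.slice (pvSplitSlash rp) none (some (-1)))).foldl
          (fun counts p => counts.insert p (counts.getD p 0 + 1)) counts
  rw [PySem.List.slice_to_neg_one, pvAccumChain_none, ← pvChain_split (pvSplitSlash rp),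
    List.foldl_map]

-- ===== VERDICT (by name: the statement is the Claim_ definition above) =====
theorem compute_folder_counts_py_spec : Claim_equal_compute_folder_counts_py := by
  intro rel_paths _
  unfold Spec_compute_folder_counts_py
  exact pv_final rel_paths
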